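-- pv_equiv track=rewrite | github.com/chom58/pdf-crusher | pdf_crusher.py | _group_contiguous
-- ===== SOURCE A (Python) =====
-- def _group_contiguous(pages: list[int]) -> list[tuple[int, int]]:
--     """ソート済みページ番号リストを連続範囲にグループ化。"""
--     if not pages:
--         return []
--     ranges = []
--     start = pages[0]
--     end = pages[0]
--     for p in pages[1:]:
--         if p == end + 1:
--             end = p
--         else:
--             ranges.append((start, end))
--             start = p
--             end = p
--     ranges.append((start, end))
--     return ranges
-- ===== SOURCE B (Python) =====
-- def _group_contiguous(pages: list[int]) -> list[tuple[int, int]]: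
--     """Two-pointer run extraction: for each run start i, advance j to the run's
--     last index, emit (pages[i], pages[j]) and jump to j+1."""
--     res = []
--     i = 0
--     n = len(pages)
--     while i < n:
--         j = i
--         while j + 1 < n and pages[j + 1] == pages[j] + 1:
--             j += 1
--         res.append((pages[i], pages[j]))
--         i = j + 1
--     return res
-- ===== Notes on version B (the rewrite author's own statement) =====
-- stated objective: alternative
-- what changed: Replaces A's single scan with a start/end accumulator and a ranges list by a two-pointer run extractor: an inner loop advances to the end of each contiguous run and the pair is emitted directly, the outer loop jumping past the run.
import Mathlib
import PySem

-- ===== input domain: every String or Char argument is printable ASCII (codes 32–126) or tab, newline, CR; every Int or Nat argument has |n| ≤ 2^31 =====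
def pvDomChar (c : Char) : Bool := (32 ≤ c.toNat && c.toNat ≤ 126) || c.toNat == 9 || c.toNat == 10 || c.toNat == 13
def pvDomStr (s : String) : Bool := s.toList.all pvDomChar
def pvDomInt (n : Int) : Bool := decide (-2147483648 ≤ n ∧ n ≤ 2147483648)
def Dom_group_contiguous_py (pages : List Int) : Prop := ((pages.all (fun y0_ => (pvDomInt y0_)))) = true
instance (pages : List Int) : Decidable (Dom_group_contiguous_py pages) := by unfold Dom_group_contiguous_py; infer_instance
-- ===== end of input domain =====

-- B is an alternative O(n) two-pointer run extractor (not faster, structurally different);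
-- equivalence with A's accumulator scan is proved on all inputs (both are total).

-- ===== PORT A =====
-- loop body of A's for-loop: state = (ranges, start, end)
def pvStepA (acc : List (Int × Int) × Int × Int) (p : Int) : List (Int × Int) × Int × Int :=
  if p = acc.2.2 + 1 then (acc.1, acc.2.1, p)
  else (acc.1 ++ [(acc.2.1, acc.2.2)], p, p)

def group_contiguous_py (pages : List Int) : List (Int × Int) :=
  match pages with
  | [] => []
  | p0 :: rest =>
    let st := rest.foldl pvStepA ([], p0, p0)
    st.1 ++ [(st.2.1, st.2.2)]

-- ===== PORT B =====
-- inner while loop of Source B: how far the contiguous run starting after `prev` extends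
def pvRunLen (prev : Int) : List Int → Nat
  | [] => 0
  | p :: rest => if p = prev + 1 then pvRunLen p rest + 1 else 0

-- outer while loop of Source B: emit (first, last) of the run, jump past it
def group_contiguous_py_alt : List Int → List (Int × Int)
  | [] => []
  | p :: rest =>
    let k := pvRunLen p rest
    (p, (p :: rest).getD k 0) :: group_contiguous_py_alt (rest.drop k)
termination_by l => l.length
decreasing_by simp [List.length_drop]

-- ===== PRECONDITION & SPEC =====
def Spec_group_contiguous_py (pages : List Int) (out : List (Int × Int)) : Prop := out = group_contiguous_py_alt pages
instance (pages : List Int) (out : List (Int × Int)) : Decidable (Spec_group_contiguous_py pages out) := by unfold Spec_group_contiguous_py; infer_instance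

-- ===== CLAIM (what is proved, stated in full; the proofs are below) =====
def Claim_equal_group_contiguous_py : Prop := ∀ (pages : List Int), Dom_group_contiguous_py pages → Spec_group_contiguous_py pages (group_contiguous_py pages)

-- ===== LEMMAS AND PROOFS =====

-- common characterisation: the groups of `l` when the current open range is (s, e)
def pvGroups (s e : Int) : List Int → List (Int × Int)
  | [] => [(s, e)]
  | p :: r => if p = e + 1 then pvGroups s p r else (s, e) :: pvGroups p p r

theorem pvFoldA_eq (rest : List Int) (ranges : List (Int × Int)) (s e : Int) :
    (rest.foldl pvStepA (ranges, s, e)).1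
      ++ [((rest.foldl pvStepA (ranges, s, e)).2.1, (rest.foldl pvStepA (ranges, s, e)).2.2)]
      = ranges ++ pvGroups s e rest := by
  induction rest generalizing ranges s e with
  | nil => simp [pvGroups]
  | cons p r ih =>
    simp only [List.foldl, pvStepA, pvGroups]
    split
    · exact ih ranges s p
    · rw [ih (ranges ++ [(s, e)]) p p]; simp

theorem pvAlt_eq (l : List Int) (s e : Int) :
    pvGroups s e l
      = (s, (e :: l).getD (pvRunLen e l) 0) :: group_contiguous_py_alt (l.drop (pvRunLen e l)) := by
  induction l generalizing s e with
  | nil => simp [pvGroups, pvRunLen, group_contiguous_py_alt.eq_1]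
  | cons p r ih =>
    by_cases h : p = e + 1
    · simp only [pvGroups, pvRunLen, if_pos h]
      rw [ih s p]
      simp
    · simp only [pvGroups, pvRunLen, if_neg h]
      simp only [List.drop_zero]
      rw [group_contiguous_py_alt.eq_2]
      rw [← ih p p]
      simp

-- ===== VERDICT (by name: the statement is the Claim_ definition above) =====
theorem group_contiguous_py_spec : Claim_equal_group_contiguous_py := by
  intro pages _
  unfold Spec_group_contiguous_py
  cases pages with
  | nil => rw [group_contiguous_py_alt.eq_1]; rfl
  | cons p0 rest =>
    show (rest.foldl pvStepA ([], p0, p0)).1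
        ++ [((rest.foldl pvStepA ([], p0, p0)).2.1, (rest.foldl pvStepA ([], p0, p0)).2.2)]
        = group_contiguous_py_alt (p0 :: rest)
    rw [pvFoldA_eq rest [] p0 p0, group_contiguous_py_alt.eq_2, ← pvAlt_eq rest p0 p0]
    simp
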